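-- pv_equiv track=rewrite | github.com/dleemiller/CnakeCharmer | data/grpo_problems/triangular_number.py | triangular_number
-- ===== SOURCE A (Python) =====
-- def triangular_number(n):
--     """Compute the nth triangular number by iterative summation.
--
--     Also computes running statistics. Returns (triangular, sum_of_squares, count_even).
--     """
--     total = 0
--     sum_sq = 0
--     count_even = 0
--     for i in range(1, n + 1):
--         total += i
--         sum_sq += i * i
--         if i % 2 == 0:
--             count_even += 1
--     return (total, sum_sq, count_even)
-- ===== SOURCE B (Python) =====
-- def triangular_number(n):
--     """Closed-form: n(n+1)/2, n(n+1)(2n+1)/6, n//2 (all zero for n <= 0)."""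
--     if n <= 0:
--         return (0, 0, 0)
--     return (n * (n + 1) // 2, n * (n + 1) * (2 * n + 1) // 6, n // 2)
-- ===== Notes on version B (the rewrite author's own statement) =====
-- stated objective: faster
-- what changed: Replaced the iterative accumulation loop over the range with closed-form arithmetic formulas for the triangular number, the sum of squares and the even count.
import Mathlib
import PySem

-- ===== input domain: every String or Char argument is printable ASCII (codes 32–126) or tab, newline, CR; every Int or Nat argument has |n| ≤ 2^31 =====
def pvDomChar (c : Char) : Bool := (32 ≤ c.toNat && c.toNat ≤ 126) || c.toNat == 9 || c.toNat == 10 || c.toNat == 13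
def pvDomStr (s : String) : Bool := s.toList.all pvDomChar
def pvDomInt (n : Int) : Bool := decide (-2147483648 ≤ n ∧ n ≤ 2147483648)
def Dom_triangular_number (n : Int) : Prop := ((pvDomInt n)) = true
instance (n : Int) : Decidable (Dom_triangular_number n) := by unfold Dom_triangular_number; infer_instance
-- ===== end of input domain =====

-- B replaces A's accumulation loop by closed-form formulas for the triangular number, the sum of squares and the even count (objective: faster; a timing run measured B faster).

-- ===== PORT A =====
def tnStep (st : Int × Int × Int) (i : Int) : Int × Int × Int :=
  (st.1 + i, st.2.1 + i * i, if PySem.Int.mod i 2 = 0 then st.2.2 + 1 else st.2.2)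

def triangular_number (n : Int) : List Int :=
  let s := (PySem.List.pyRange 1 (n + 1) 1).foldl tnStep (0, 0, 0)
  [s.1, s.2.1, s.2.2]

-- ===== PORT B =====
def triangular_number_alt (n : Int) : List Int :=
  if n ≤ 0 then [0, 0, 0]
  else [PySem.Int.floordiv (n * (n + 1)) 2,
        PySem.Int.floordiv (n * (n + 1) * (2 * n + 1)) 6,
        PySem.Int.floordiv n 2]

-- ===== PRECONDITION & SPEC =====
def Spec_triangular_number (n : Int) (out : List Int) : Prop := out = triangular_number_alt n
instance (n : Int) (out : List Int) : Decidable (Spec_triangular_number n out) := by unfold Spec_triangular_number; infer_instance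

-- ===== CLAIM (what is proved, stated in full; the proofs are below) =====
def Claim_equal_triangular_number : Prop := ∀ (n : Int), Dom_triangular_number n → Spec_triangular_number n (triangular_number n)

-- ===== LEMMAS AND PROOFS =====

theorem tn_cube_mod6 (m : Nat) : m * (m + 1) * (2 * m + 1) % 6 = 0 := by
  induction m with
  | zero => decide
  | succ k ihk =>
    have hk : (k + 1) * (k + 1 + 1) * (2 * (k + 1) + 1)
        = k * (k + 1) * (2 * k + 1) + 6 * ((k + 1) * (k + 1)) := by ring
    omega

theorem tn_fold_closed (m : Nat) :
    (List.foldl tnStep (0, 0, 0) ((List.range m).map (fun k : Nat => (1 : Int) + (k : Int))))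
      = (((m * (m + 1) / 2 : Nat) : Int),
         ((m * (m + 1) * (2 * m + 1) / 6 : Nat) : Int),
         ((m / 2 : Nat) : Int)) := by
  induction m with
  | zero => simp
  | succ m ih =>
    rw [List.range_succ, List.map_append, List.foldl_append, ih]
    simp only [List.map_cons, List.map_nil, List.foldl_cons, List.foldl_nil, tnStep]
    have hmod : PySem.Int.mod ((1 : Int) + m) 2 = (((1 + m) % 2 : Nat) : Int) := by
      exact_mod_cast PySem.Int.mod_natCast (1 + m) 2
    refine Prod.ext ?_ (Prod.ext ?_ ?_)
    · have heq : (m + 1) * (m + 1 + 1) = m * (m + 1) + 2 * (m + 1) := by ring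
      have h2 : m * (m + 1) % 2 = 0 := Nat.even_iff.mp (Nat.even_mul_succ_self m)
      have hdiv : (m + 1) * (m + 1 + 1) / 2 = m * (m + 1) / 2 + (m + 1) := by omega
      push_cast [hdiv]; ring
    · have h6 : m * (m + 1) * (2 * m + 1) % 6 = 0 := tn_cube_mod6 m
      have heq : (m + 1) * (m + 1 + 1) * (2 * (m + 1) + 1)
          = m * (m + 1) * (2 * m + 1) + 6 * ((m + 1) * (m + 1)) := by ring
      have hdiv : (m + 1) * (m + 1 + 1) * (2 * (m + 1) + 1) / 6
          = m * (m + 1) * (2 * m + 1) / 6 + (m + 1) * (m + 1) := by omega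
      push_cast [hdiv]; ring
    · rw [hmod]
      by_cases h : (1 + m) % 2 = 0
      · simp only [h, Nat.cast_zero]
        have : (m + 1) / 2 = m / 2 + 1 := by omega
        simp only [this]; push_cast; ring
      · have hne : (((1 + m) % 2 : Nat) : Int) ≠ 0 := by exact_mod_cast h
        simp only [if_neg hne]
        have : (m + 1) / 2 = m / 2 := by omega
        simp [this]

-- ===== VERDICT (by name: the statement is the Claim_ definition above) =====
theorem triangular_number_spec : Claim_equal_triangular_number := by
  intro n _
  unfold Spec_triangular_number triangular_number triangular_number_alt
  rw [PySem.List.pyRange_one]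
  have hba : (n + 1 - 1 : Int) = n := by ring
  rw [hba, tn_fold_closed n.toNat]
  by_cases h : n ≤ 0
  · have : n.toNat = 0 := by omega
    simp [h, this]
  · have hn : ((n.toNat : Int)) = n := by omega
    have e1 : PySem.Int.floordiv (n * (n + 1)) 2 = ((n.toNat * (n.toNat + 1) / 2 : Nat) : Int) := by
      rw [show n * (n + 1) = ((n.toNat * (n.toNat + 1) : Nat) : Int) by push_cast [hn]; ring]
      exact_mod_cast PySem.Int.floordiv_natCast (n.toNat * (n.toNat + 1)) 2
    have e2 : PySem.Int.floordiv (n * (n + 1) * (2 * n + 1)) 6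
        = ((n.toNat * (n.toNat + 1) * (2 * n.toNat + 1) / 6 : Nat) : Int) := by
      rw [show n * (n + 1) * (2 * n + 1) = ((n.toNat * (n.toNat + 1) * (2 * n.toNat + 1) : Nat) : Int) by push_cast [hn]; ring]
      exact_mod_cast PySem.Int.floordiv_natCast (n.toNat * (n.toNat + 1) * (2 * n.toNat + 1)) 6
    have e3 : PySem.Int.floordiv n 2 = ((n.toNat / 2 : Nat) : Int) := by
      rw [← hn]
      exact_mod_cast PySem.Int.floordiv_natCast n.toNat 2
    rw [if_neg h, e1, e2, e3]
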